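-- pv_equiv track=rewrite | github.com/dewgenenny/hagocoax | custom_components/gocoax/sensor.py | byte2ascii
-- ===== SOURCE A (Python) =====
-- def byte2ascii(hex_str):
--     try:
--         bytes_obj = bytes.fromhex(hex_str)
--         ascii_str = ''
--         for b in bytes_obj:
--             if 0 < b < 0x80:
--                 ascii_str += chr(b)
--             else:
--                 return ''
--         return ascii_str
--     except ValueError:
--         return ''
-- ===== SOURCE B (Python) =====
-- _HEX = {c: i for i, c in enumerate('0123456789abcdef')}
-- _WS = ' \t\n\r\x0b\x0c'
--
--
-- def byte2ascii(hex_str):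
--     # Single fused pass over the hex text itself: skip whitespace between pairs,
--     # translate each hex-digit pair straight to its character (only if the byte
--     # value is in (0, 0x80)), never materialising a bytes buffer.
--     out = []
--     i = 0
--     n = len(hex_str)
--     while i < n:
--         c = hex_str[i]
--         if c in _WS:
--             i += 1
--             continue
--         if i + 1 == n:
--             return ''
--         hi = _HEX.get(c.lower())
--         lo = _HEX.get(hex_str[i + 1].lower())
--         if hi is None or lo is None:
--             return ''
--         b = 16 * hi + lo
--         if not 0 < b < 0x80:
--             return ''
--         out.append(chr(b))
--         i += 2
--     return ''.join(out)
-- ===== Notes on version B (the rewrite author's own statement) =====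
-- stated objective: alternative
-- what changed: Replaced bytes.fromhex plus a check-and-build loop over the byte buffer by a single recursive descent over the hex characters that skips whitespace, converts each digit pair straight to its character with the (0,0x80) range check fused into the parse, and never materialises a bytes object.
import Mathlib
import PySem

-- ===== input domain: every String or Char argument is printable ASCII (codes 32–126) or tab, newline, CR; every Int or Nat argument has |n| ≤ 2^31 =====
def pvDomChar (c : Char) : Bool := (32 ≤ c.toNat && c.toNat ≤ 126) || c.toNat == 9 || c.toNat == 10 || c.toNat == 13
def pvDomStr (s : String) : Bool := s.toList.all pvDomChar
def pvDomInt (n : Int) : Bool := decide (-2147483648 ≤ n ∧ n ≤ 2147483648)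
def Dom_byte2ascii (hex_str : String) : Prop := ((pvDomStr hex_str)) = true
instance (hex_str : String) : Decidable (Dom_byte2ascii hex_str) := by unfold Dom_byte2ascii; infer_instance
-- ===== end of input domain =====

-- B replaces A's bytes.fromhex-then-check-and-build loop by one fused pass over the hex
-- characters that translates each digit pair straight to its character, never building a byte
-- buffer (objective: alternative; return values proved equal on Dom).

-- hex digit value of a char, none if not a hex digit
def pvHexVal? (c : Char) : Option Nat :=
  if '0' ≤ c ∧ c ≤ '9' then some (c.toNat - 48)
  else if 'a' ≤ c ∧ c ≤ 'f' then some (c.toNat - 87)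
  else if 'A' ≤ c ∧ c ≤ 'F' then some (c.toNat - 55)
  else none

-- ASCII whitespace, which bytes.fromhex skips between byte pairs
def pvIsSpace (c : Char) : Bool :=
  c == ' ' || c == '\t' || c == '\n' || c == '\x0d' || c == '\x0b' || c == '\x0c'

-- ===== PORT A =====
-- bytes.fromhex: skip whitespace between pairs; two adjacent hex digits form a byte; else ValueError
def pvFromhex? : List Char → Option (List Nat)
  | [] => some []
  | c :: rest =>
    if pvIsSpace c then pvFromhex? rest
    else match rest with
      | [] => none
      | d :: rest' =>
        match pvHexVal? c, pvHexVal? d with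
        | some hi, some lo => (pvFromhex? rest').map (fun bs => (16 * hi + lo) :: bs)
        | _, _ => none
  termination_by l => l.length

-- A's loop: append chr(b) for each byte, returning '' as soon as a byte is outside (0, 0x80)
def byte2asciiLoopA : List Nat → List Char → String
  | [], acc => String.ofList acc
  | b :: bs, acc =>
    if 0 < b ∧ b < 128 then byte2asciiLoopA bs (acc ++ [Char.ofNat b])
    else ""

def byte2ascii (hex_str : String) : String :=
  match pvFromhex? hex_str.toList with
  | none => ""                                -- except ValueError: return ''
  | some bytes_obj => byte2asciiLoopA bytes_obj []

-- ===== PORT B =====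
-- B's while loop: one fused pass over the hex chars, accumulating out (append = out.append(chr(b)))
def asciiFromHexLoop : List Char → List Char → String
  | [], out => String.ofList out                 -- ''.join(out)
  | c :: rest, out =>
    if pvIsSpace c then asciiFromHexLoop rest out
    else match rest with
      | [] => ""                                 -- lone trailing digit: return ''
      | d :: rest' =>
        match pvHexVal? c, pvHexVal? d with
        | some hi, some lo =>
          if 0 < 16 * hi + lo ∧ 16 * hi + lo < 128 then
            asciiFromHexLoop rest' (out ++ [Char.ofNat (16 * hi + lo)])
          else ""
        | _, _ => ""
  termination_by l _ => l.length

def byte2ascii_alt (hex_str : String) : String :=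
  asciiFromHexLoop hex_str.toList []

-- ===== PRECONDITION & SPEC =====
def Spec_byte2ascii (hex_str : String) (out : String) : Prop := out = byte2ascii_alt hex_str
instance (hex_str : String) (out : String) : Decidable (Spec_byte2ascii hex_str out) := by unfold Spec_byte2ascii; infer_instance

-- ===== CLAIM =====
def Claim_equal_byte2ascii : Prop := ∀ (hex_str : String), Dom_byte2ascii hex_str → Spec_byte2ascii hex_str (byte2ascii hex_str)

-- ===== LEMMAS AND PROOFS =====

-- A's loop equals validate-then-map, for any accumulator
theorem byte2asciiLoopA_eq (bs : List Nat) : ∀ acc : List Char,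
    byte2asciiLoopA bs acc =
      if ∀ b ∈ bs, 0 < b ∧ b < 128 then String.ofList (acc ++ bs.map Char.ofNat)
      else "" := by
  induction bs with
  | nil => intro acc; simp [byte2asciiLoopA]
  | cons b bs ih =>
    intro acc
    by_cases h : 0 < b ∧ b < 128
    · simp [byte2asciiLoopA, h, ih]
    · simp [byte2asciiLoopA, h]

-- B's fused loop equals A's parse followed by validate-and-build, for any accumulator
theorem asciiFromHexLoop_eq (l : List Char) (out : List Char) :
    asciiFromHexLoop l out =
      match pvFromhex? l with
      | none => ""
      | some bs =>
        if ∀ b ∈ bs, 0 < b ∧ b < 128 then String.ofList (out ++ bs.map Char.ofNat) else "" := by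
  induction l, out using asciiFromHexLoop.induct with
  | case1 out => simp [asciiFromHexLoop, pvFromhex?]
  | case2 c rest out hsp ih =>
    rw [asciiFromHexLoop.eq_def, pvFromhex?.eq_def]
    simp only [hsp, if_true]
    exact ih
  | case3 c out hnsp =>
    rw [asciiFromHexLoop.eq_def, pvFromhex?.eq_def]
    simp [hnsp]
  | case4 c out hnsp d rest' hi lo hlo hhi hrange ih =>
    rw [asciiFromHexLoop.eq_def, pvFromhex?.eq_def]
    simp only [hnsp, Bool.false_eq_true, if_false, hhi, hlo, if_pos hrange, ih]
    cases pvFromhex? rest' with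
    | none => rfl
    | some bs =>
      by_cases hall : ∀ b ∈ bs, 0 < b ∧ b < 128
      · have h0 : 0 < hi ∨ 0 < lo := by omega
        simp [h0, hrange.2]
      · simp [hall]
  | case5 c out hnsp d rest' hi lo hlo hhi hnrange =>
    rw [asciiFromHexLoop.eq_def, pvFromhex?.eq_def]
    simp only [hnsp, Bool.false_eq_true, if_false, hhi, hlo, if_neg hnrange]
    cases pvFromhex? rest' with
    | none => rfl
    | some bs =>
      have hne : ¬ ∀ b ∈ (16 * hi + lo) :: bs, 0 < b ∧ b < 128 :=
        fun h => hnrange (h _ (by simp))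
      exact (if_neg hne).symm
  | case6 c out hnsp d rest' hnone =>
    rw [asciiFromHexLoop.eq_def, pvFromhex?.eq_def]
    simp only [hnsp, Bool.false_eq_true, if_false]

-- ===== VERDICT =====
theorem byte2ascii_spec : Claim_equal_byte2ascii := by
  intro hex_str _
  unfold Spec_byte2ascii byte2ascii byte2ascii_alt
  rw [asciiFromHexLoop_eq]
  cases pvFromhex? hex_str.toList with
  | none => rfl
  | some bs =>
    show byte2asciiLoopA bs [] = _
    rw [byte2asciiLoopA_eq]
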